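-- pv_equiv track=rewrite | github.com/dsweber2/advent2021 | src/day2.py | get_depth_length
-- ===== SOURCE A (Python) =====
-- def get_depth_length(separated):
--     horizontal = 0
--     vertical = 0
--     for x in separated:
--         if x[0] == "forward":
--             horizontal += int(x[1])
--         elif x[0] == "down":
--             vertical += int(x[1])
--         elif x[0] == "up":
--             vertical -= int(x[1])
--     return horizontal * vertical
-- ===== SOURCE B (Python) =====
-- DIRS = {"forward": (1, 0), "down": (0, 1), "up": (0, -1)}
--
--
-- def get_depth_length(separated):
--     data = list(separated)
--
--     def go(lo, hi):
--         # vector sum (dh_total, dv_total) of data[lo:hi], by halving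
--         if hi - lo == 0:
--             return (0, 0)
--         if hi - lo == 1:
--             cmd, amt = data[lo]
--             if cmd in DIRS:
--                 dh, dv = DIRS[cmd]
--                 n = int(amt)
--                 return (dh * n, dv * n)
--             return (0, 0)
--         mid = (lo + hi) // 2
--         h1, v1 = go(lo, mid)
--         h2, v2 = go(mid, hi)
--         return (h1 + h2, v1 + v2)
--
--     h, v = go(0, len(data))
--     return h * v
-- ===== Notes on version B (the rewrite author's own statement) =====
-- stated objective: alternative
-- what changed: Replaces A's sequential if/elif loop carrying two mutable accumulators by a table-driven divide-and-conquer: each command maps through a direction-vector dict to a scaled (dh,dv) vector and the vectors are summed by recursive halving of the index range, multiplying the two totals at the end (correct because vector addition is associative and commutative).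
import Mathlib
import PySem

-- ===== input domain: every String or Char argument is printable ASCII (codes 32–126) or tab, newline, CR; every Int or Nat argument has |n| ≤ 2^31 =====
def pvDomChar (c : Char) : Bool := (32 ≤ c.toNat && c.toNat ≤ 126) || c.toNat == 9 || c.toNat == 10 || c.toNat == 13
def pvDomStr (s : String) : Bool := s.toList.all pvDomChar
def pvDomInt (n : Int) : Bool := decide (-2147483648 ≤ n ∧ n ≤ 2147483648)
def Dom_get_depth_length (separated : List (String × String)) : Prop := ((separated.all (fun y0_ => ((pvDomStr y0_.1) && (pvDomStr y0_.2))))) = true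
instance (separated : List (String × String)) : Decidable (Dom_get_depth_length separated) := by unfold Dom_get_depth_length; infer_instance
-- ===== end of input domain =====

-- B replaces A's sequential if/elif loop over two mutable accumulators by a table-driven
-- divide-and-conquer vector sum (recursive halving); equal results proved.

-- ===== PORT A =====
-- A: one forward pass, updating (horizontal, vertical); int(x[1]) only in the matched branch.
def pvStep (acc : Int × Int) (x : String × String) : Int × Int :=
  if x.1 == "forward" then (acc.1 + (PySem.Int.ofStr? x.2).getD 0, acc.2)
  else if x.1 == "down" then (acc.1, acc.2 + (PySem.Int.ofStr? x.2).getD 0)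
  else if x.1 == "up" then (acc.1, acc.2 - (PySem.Int.ofStr? x.2).getD 0)
  else acc

def get_depth_length (separated : List (String × String)) : Int :=
  let st := separated.foldl pvStep ((0 : Int), (0 : Int))
  st.1 * st.2

-- ===== PORT B =====
-- B: direction table DIRS (a Python module-level dict) and recursive halving over the
-- index range [lo, hi); the port recurses on the sublist: data[lo:hi] becomes l, and
-- Python's split point mid = (lo+hi)//2 is, relative to lo, (hi-lo)//2 = l.length/2
-- exactly (lo+hi and hi-lo have the same parity, both indices nonnegative) — exact.
def pvDirs : PySem.Dict String (Int × Int) :=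
  PySem.Dict.mk [("forward", (1, 0)), ("down", (0, 1)), ("up", (0, -1))]

-- the length-1 base case of go: the scaled direction vector of one command pair
def pvLeaf (x : String × String) : Int × Int :=
  match pvDirs.get? x.1 with
  | some (dh, dv) =>
      let n := (PySem.Int.ofStr? x.2).getD 0
      (dh * n, dv * n)
  | none => (0, 0)

def pvGo : List (String × String) → Int × Int
  | [] => (0, 0)
  | [x] => pvLeaf x
  | x :: y :: t =>
    let mid := (x :: y :: t).length / 2
    let a := pvGo ((x :: y :: t).take mid)
    let b := pvGo ((x :: y :: t).drop mid)
    (a.1 + b.1, a.2 + b.2)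
termination_by l => l.length
decreasing_by
  · simp [List.length_take]; omega
  · simp [List.length_drop]; omega

def get_depth_length_alt (separated : List (String × String)) : Int :=
  let hv := pvGo separated
  hv.1 * hv.2

-- ===== PRECONDITION & SPEC =====
-- Pre_ excludes exactly the inputs where Python's int(x[1]) raises ValueError
-- (a recognized command pair whose second component is not int-parseable).
def Pre_get_depth_length (separated : List (String × String)) : Prop :=
  ∀ x ∈ separated, (x.1 = "forward" ∨ x.1 = "down" ∨ x.1 = "up") → (PySem.Int.ofStr? x.2).isSome
instance (separated : List (String × String)) : Decidable (Pre_get_depth_length separated) := by unfold Pre_get_depth_length; infer_instance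

def pvWitness_get_depth_length : (List (String × String)) := [("forward", "3"), ("down", "4"), ("up", "1")]

def Spec_get_depth_length (separated : List (String × String)) (out : Int) : Prop := out = get_depth_length_alt separated
instance (separated : List (String × String)) (out : Int) : Decidable (Spec_get_depth_length separated out) := by unfold Spec_get_depth_length; infer_instance

-- ===== CLAIM (what is proved, stated in full; the proofs are below) =====
def Claim_equal_get_depth_length : Prop := ∀ (separated : List (String × String)), Dom_get_depth_length separated → Pre_get_depth_length separated → Spec_get_depth_length separated (get_depth_length separated)

-- ===== LEMMAS AND PROOFS =====

-- linear characterisation of the tree reduction (proof helper only)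
def pvLin : List (String × String) → Int × Int
  | [] => (0, 0)
  | x :: t =>
    let a := pvLeaf x
    let b := pvLin t
    (a.1 + b.1, a.2 + b.2)

lemma pvLin_append (l₁ l₂ : List (String × String)) :
    pvLin (l₁ ++ l₂) = ((pvLin l₁).1 + (pvLin l₂).1, (pvLin l₁).2 + (pvLin l₂).2) := by
  induction l₁ with
  | nil => simp [pvLin]
  | cons a t ih => simp [pvLin, ih]; constructor <;> ring

lemma pvGo_eq_pvLin (l : List (String × String)) : pvGo l = pvLin l := by
  induction l using pvGo.induct with
  | case1 => simp [pvGo, pvLin]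
  | case2 x => simp [pvGo, pvLin]
  | case3 x y t mid ih1 ih2 =>
    rw [pvGo]
    rw [ih1, ih2]
    conv_rhs => rw [← List.take_append_drop (((x :: y :: t).length) / 2) (x :: y :: t)]
    rw [pvLin_append]

lemma pv_fold_eq (l : List (String × String)) : ∀ (h v : Int),
    l.foldl pvStep (h, v) = (h + (pvLin l).1, v + (pvLin l).2) := by
  induction l with
  | nil => intro h v; simp [pvLin]
  | cons a t ih =>
    intro h v
    obtain ⟨cmd, amt⟩ := a
    simp only [List.foldl_cons, pvLin]
    by_cases hf : cmd = "forward"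
    · subst hf
      simp only [pvStep, pvLeaf, pvDirs, PySem.Dict.get?_mk_cons]
      simp [ih]
      all_goals ring
    · by_cases hd : cmd = "down"
      · subst hd
        simp only [pvStep, pvLeaf, pvDirs, PySem.Dict.get?_mk_cons]
        simp [ih]
        all_goals ring
      · by_cases hu : cmd = "up"
        · subst hu
          simp only [pvStep, pvLeaf, pvDirs, PySem.Dict.get?_mk_cons]
          simp [ih]
          all_goals ring
        · simp only [pvStep, pvLeaf, pvDirs, PySem.Dict.get?_mk_cons]
          simp [ih, hf, hd, hu, Ne.symm hf, Ne.symm hd, Ne.symm hu, PySem.Dict.get?]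

-- ===== VERDICT (by name: the statement is the Claim_ definition above) =====
theorem get_depth_length_spec : Claim_equal_get_depth_length := by
  intro separated _ _
  show get_depth_length separated = get_depth_length_alt separated
  simp only [get_depth_length, get_depth_length_alt, pvGo_eq_pvLin, pv_fold_eq]
  simp
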